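-- pv_equiv track=rewrite | github.com/OrlovAlexandr/test_drive_detector | utils/recalibration.py | get_full_lot_ranges
-- ===== SOURCE A (Python) =====
-- def get_full_lot_ranges(timestamps_full: list, max_gap: int=3) -> list:
--     """
--     Find ranges with more than full parking lot
--     Args:
--         timestamps_full: list of timestamps
--         max_gap: maximum gap between two timestamps
--
--     Returns:
--         ranges: list of tuples (start_time, end_time)
--     """
--     ranges = []
--     start_time = timestamps_full[0]
--     end_time = timestamps_full[0]
--
--     for timestamp in timestamps_full[1:]:
--         if timestamp - end_time <= max_gap:
--             end_time = timestamp
--         else: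
--             ranges.append((start_time, end_time))
--             start_time = timestamp
--             end_time = timestamp
--     ranges.append((start_time, end_time))
--
--     return ranges
-- ===== SOURCE B (Python) =====
-- def get_full_lot_ranges(timestamps_full: list, max_gap: int = 3) -> list:
--     # Group starts are the first element plus every element whose gap to its
--     # predecessor exceeds max_gap; group ends are the matching predecessors
--     # plus the last element. Zipping them gives the ranges.
--     pairs = list(zip(timestamps_full, timestamps_full[1:]))
--     starts = [timestamps_full[0]] + [b for a, b in pairs if b - a > max_gap]
--     ends = [a for a, b in pairs if b - a > max_gap] + [timestamps_full[-1]]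
--     return list(zip(starts, ends))
-- ===== Notes on version B (the rewrite author's own statement) =====
-- stated objective: alternative
-- what changed: Replaces A's stateful accumulator loop (tracking start_time/end_time and appending on breaks) with a declarative decomposition: zip consecutive pairs, filter the over-gap pairs into a starts list and an ends list, and zip those two lists into the ranges.
import Mathlib
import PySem

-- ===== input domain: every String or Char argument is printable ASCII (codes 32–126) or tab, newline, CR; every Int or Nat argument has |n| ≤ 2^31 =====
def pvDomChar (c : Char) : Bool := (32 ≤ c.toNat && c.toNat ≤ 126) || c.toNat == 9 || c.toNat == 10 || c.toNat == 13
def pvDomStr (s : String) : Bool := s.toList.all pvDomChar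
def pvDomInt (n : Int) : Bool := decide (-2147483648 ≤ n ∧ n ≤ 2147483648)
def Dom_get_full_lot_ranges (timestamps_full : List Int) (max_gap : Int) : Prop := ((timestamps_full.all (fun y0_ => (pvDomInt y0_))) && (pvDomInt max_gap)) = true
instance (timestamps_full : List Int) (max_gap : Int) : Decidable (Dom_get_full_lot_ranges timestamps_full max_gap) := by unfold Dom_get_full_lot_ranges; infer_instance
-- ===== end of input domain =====

-- B zips consecutive pairs and filters group starts/ends declaratively instead of
-- A's stateful accumulator loop; equivalence is about the return value only.

-- ===== PORT A =====
-- A: loop over timestamps_full[1:] with state (ranges, start_time, end_time).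
def get_full_lot_ranges (timestamps_full : List Int) (max_gap : Int) : List (Int × Int) :=
  match timestamps_full with
  | [] => []  -- Python raises IndexError at timestamps_full[0]; excluded by Pre_
  | t0 :: rest =>
    let st := rest.foldl
      (fun (s : List (Int × Int) × Int × Int) timestamp =>
        if timestamp - s.2.2 ≤ max_gap then (s.1, s.2.1, timestamp)
        else (s.1 ++ [(s.2.1, s.2.2)], timestamp, timestamp))
      ([], t0, t0)
    st.1 ++ [(st.2.1, st.2.2)]

-- ===== PORT B =====
-- gap-exceeding consecutive pairs: [(a, b) for a, b in zip(ts, ts[1:]) if b - a > max_gap]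
def pvGapPairs (timestamps_full : List Int) (max_gap : Int) : List (Int × Int) :=
  (timestamps_full.zip timestamps_full.tail).filter (fun p => decide (p.2 - p.1 > max_gap))

def get_full_lot_ranges_alt (timestamps_full : List Int) (max_gap : Int) : List (Int × Int) :=
  match timestamps_full with
  | [] => []  -- Python raises IndexError at timestamps_full[0]; excluded by Pre_
  | t0 :: _ =>
    let pairs := pvGapPairs timestamps_full max_gap
    let starts := t0 :: pairs.map Prod.snd
    let ends := pairs.map Prod.fst ++ [timestamps_full.getLastD 0]
    starts.zip ends

-- ===== PRECONDITION & SPEC =====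
-- Pre_ excludes exactly the empty list, on which Python A raises IndexError.
def Pre_get_full_lot_ranges (timestamps_full : List Int) (max_gap : Int) : Prop :=
  timestamps_full ≠ []
instance (timestamps_full : List Int) (max_gap : Int) : Decidable (Pre_get_full_lot_ranges timestamps_full max_gap) := by unfold Pre_get_full_lot_ranges; infer_instance

def pvWitness_get_full_lot_ranges : List Int × Int := ([1, 2, 6, 7, 20], 3)

def Spec_get_full_lot_ranges (timestamps_full : List Int) (max_gap : Int) (out : List (Int × Int)) : Prop := out = get_full_lot_ranges_alt timestamps_full max_gap
instance (timestamps_full : List Int) (max_gap : Int) (out : List (Int × Int)) : Decidable (Spec_get_full_lot_ranges timestamps_full max_gap out) := by unfold Spec_get_full_lot_ranges; infer_instance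

-- ===== CLAIM (what is proved, stated in full; the proofs are below) =====
def Claim_equal_get_full_lot_ranges : Prop := ∀ (timestamps_full : List Int) (max_gap : Int), Dom_get_full_lot_ranges timestamps_full max_gap → Pre_get_full_lot_ranges timestamps_full max_gap → Spec_get_full_lot_ranges timestamps_full max_gap (get_full_lot_ranges timestamps_full max_gap)

-- ===== LEMMAS AND PROOFS =====

-- Common reference: grouping as a structural recursion on the tail.
def pvGo (max_gap s p : Int) : List Int → List (Int × Int)
  | [] => [(s, p)]
  | t :: rs => if t - p ≤ max_gap then pvGo max_gap s t rs else (s, p) :: pvGo max_gap t t rs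

theorem pvA_go (max_gap : Int) (rs : List Int) : ∀ (acc : List (Int × Int)) (s p : Int),
    ((rs.foldl
      (fun (st : List (Int × Int) × Int × Int) timestamp =>
        if timestamp - st.2.2 ≤ max_gap then (st.1, st.2.1, timestamp)
        else (st.1 ++ [(st.2.1, st.2.2)], timestamp, timestamp))
      (acc, s, p)).1 ++
      [((rs.foldl
      (fun (st : List (Int × Int) × Int × Int) timestamp =>
        if timestamp - st.2.2 ≤ max_gap then (st.1, st.2.1, timestamp)
        else (st.1 ++ [(st.2.1, st.2.2)], timestamp, timestamp))
      (acc, s, p)).2.1,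
       (rs.foldl
      (fun (st : List (Int × Int) × Int × Int) timestamp =>
        if timestamp - st.2.2 ≤ max_gap then (st.1, st.2.1, timestamp)
        else (st.1 ++ [(st.2.1, st.2.2)], timestamp, timestamp))
      (acc, s, p)).2.2)]) = acc ++ pvGo max_gap s p rs := by
  induction rs with
  | nil => intro acc s p; simp [pvGo]
  | cons t rs ih =>
    intro acc s p
    rw [List.foldl_cons]
    by_cases h : t - p ≤ max_gap
    · rw [if_pos h]
      simp only [pvGo]
      rw [if_pos h]
      exact ih acc s t
    · rw [if_neg h]
      simp only [pvGo]
      rw [if_neg h, ih (acc ++ [(s, p)]) t t, List.append_assoc]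
      rfl

theorem pvB_go (max_gap : Int) (rs : List Int) : ∀ (s p : Int),
    ((s :: (pvGapPairs (p :: rs) max_gap).map Prod.snd).zip
      ((pvGapPairs (p :: rs) max_gap).map Prod.fst ++ [(p :: rs).getLastD 0]))
      = pvGo max_gap s p rs := by
  induction rs with
  | nil => intro s p; simp [pvGapPairs, pvGo]
  | cons t rs ih =>
    intro s p
    by_cases h : t - p ≤ max_gap
    · have hnot : ¬ (t - p > max_gap) := by omega
      have : pvGapPairs (p :: t :: rs) max_gap = pvGapPairs (t :: rs) max_gap := by
        simp [pvGapPairs, hnot]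
      rw [show ((p :: t :: rs).getLastD 0) = ((t :: rs).getLastD 0) by simp, this, ih, pvGo,
        if_pos h]
    · have hgt : t - p > max_gap := by omega
      have : pvGapPairs (p :: t :: rs) max_gap = (p, t) :: pvGapPairs (t :: rs) max_gap := by
        simp [pvGapPairs, hgt]
      rw [show ((p :: t :: rs).getLastD 0) = ((t :: rs).getLastD 0) by simp, this]
      simp only [List.map_cons, List.cons_append, List.zip_cons_cons, pvGo, if_neg h]
      rw [ih]

-- ===== VERDICT (by name: the statement is the Claim_ definition above) =====
theorem get_full_lot_ranges_spec : Claim_equal_get_full_lot_ranges := by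
  intro ts max_gap _ hpre
  unfold Spec_get_full_lot_ranges
  match ts with
  | [] => exact absurd rfl hpre
  | t0 :: rest =>
    show get_full_lot_ranges (t0 :: rest) max_gap = get_full_lot_ranges_alt (t0 :: rest) max_gap
    unfold get_full_lot_ranges get_full_lot_ranges_alt
    simp only []
    rw [pvA_go max_gap rest [] t0 t0, pvB_go max_gap rest t0 t0]
    simp
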